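-- pv_equiv track=rewrite | github.com/AlecWallace2001/ard_rand | solver.py | iterate_bi
-- ===== SOURCE A (Python) =====
-- def iterate_bi(cycle):
--     out = []
--     cycle.reverse()
--     up = True
--     for i in cycle:
--         if up:
--             if i+1==3:
--                 out.append(0)
--             else:
--                 out.append(i+1)
--                 up=False
--         else:
--             out.append(i)
--     out.reverse()
--     return out
-- ===== SOURCE B (Python) =====
-- def iterate_bi(cycle):
--     cycle.reverse()  # keep A's in-place side effect on the argument
--     n = len(cycle)
--     k = next((j for j in range(n) if cycle[j] != 2), n)
--     if k == n:
--         res = [0] * n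
--     else:
--         res = [0] * k + [cycle[k] + 1] + cycle[k + 1:]
--     res.reverse()
--     return res
-- ===== Notes on version B (the rewrite author's own statement) =====
-- stated objective: alternative
-- what changed: Replaces the boolean-carry single pass with a pivot-index decomposition: find the first non-2 element of the reversed list, then construct the output as zeros before it, pivot+1, and the unchanged tail; both mutate the argument by reversing it in place.
import Mathlib
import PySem

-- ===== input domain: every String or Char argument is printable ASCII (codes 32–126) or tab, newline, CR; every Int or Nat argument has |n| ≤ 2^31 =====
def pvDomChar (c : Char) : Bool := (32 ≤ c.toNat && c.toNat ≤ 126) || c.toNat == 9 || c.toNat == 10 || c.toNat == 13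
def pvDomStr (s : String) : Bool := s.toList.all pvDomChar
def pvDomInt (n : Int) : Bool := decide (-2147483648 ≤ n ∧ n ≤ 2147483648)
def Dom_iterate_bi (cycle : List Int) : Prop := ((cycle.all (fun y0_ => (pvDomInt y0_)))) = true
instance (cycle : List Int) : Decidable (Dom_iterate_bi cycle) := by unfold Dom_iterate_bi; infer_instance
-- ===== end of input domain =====

-- B replaces A's boolean-carry scan by a pivot-index-then-construct decomposition (same O(n) cost).
-- Both Pythons reverse the argument in place; the equivalence proved here is about the RETURN value
-- (the side effect is identical in A and B anyway).

-- ===== PORT A =====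
-- A: reverse, then one pass carrying the flag `up`; appends to `out`; reverse the output.
def iterate_bi (cycle : List Int) : List Int :=
  let rev := cycle.reverse
  let s := rev.foldl (fun (s : List Int × Bool) i =>
      if s.2 then
        if i + 1 = 3 then (s.1 ++ [0], s.2)
        else (s.1 ++ [i + 1], false)
      else (s.1 ++ [i], s.2)) ([], true)
  s.1.reverse

-- ===== PORT B =====
-- B: reverse, find first index k with value ≠ 2 (k = length if none), build zeros ++ pivot+1 ++ tail.
def iterate_bi_alt (cycle : List Int) : List Int :=
  let rev := cycle.reverse
  let n := rev.length
  let k := rev.findIdx (fun i => i ≠ 2)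
  let res := if k = n then List.replicate n 0
    else List.replicate k 0 ++ [(rev[k]?.getD 0) + 1] ++ rev.drop (k + 1)
  res.reverse

-- ===== PRECONDITION & SPEC =====
def Spec_iterate_bi (cycle : List Int) (out : List Int) : Prop := out = iterate_bi_alt cycle
instance (cycle : List Int) (out : List Int) : Decidable (Spec_iterate_bi cycle out) := by unfold Spec_iterate_bi; infer_instance

-- ===== CLAIM (what is proved, stated in full; the proofs are below) =====
def Claim_equal_iterate_bi : Prop := ∀ (cycle : List Int), Dom_iterate_bi cycle → Spec_iterate_bi cycle (iterate_bi cycle)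

-- ===== LEMMAS AND PROOFS =====

-- The value A's carry pass computes on a (reversed) list, as a structural recursion.
def pvCarry : List Int → List Int
  | [] => []
  | i :: t => if i + 1 = 3 then 0 :: pvCarry t else (i + 1) :: t

theorem pvFold_false (l acc : List Int) :
    l.foldl (fun (s : List Int × Bool) i =>
      if s.2 then
        if i + 1 = 3 then (s.1 ++ [0], s.2)
        else (s.1 ++ [i + 1], false)
      else (s.1 ++ [i], s.2)) (acc, false) = (acc ++ l, false) := by
  induction l generalizing acc with
  | nil => simp
  | cons i t ih => simp [List.foldl_cons, ih]

theorem pvFold_true (l acc : List Int) :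
    (l.foldl (fun (s : List Int × Bool) i =>
      if s.2 then
        if i + 1 = 3 then (s.1 ++ [0], s.2)
        else (s.1 ++ [i + 1], false)
      else (s.1 ++ [i], s.2)) (acc, true)).1 = acc ++ pvCarry l := by
  induction l generalizing acc with
  | nil => simp [pvCarry]
  | cons i t ih =>
    by_cases h : i + 1 = 3
    · simp [List.foldl_cons, h, pvCarry, ih]
    · simp [List.foldl_cons, h, pvCarry, pvFold_false]

theorem pvCarry_eq_construct (l : List Int) :
    pvCarry l =
      (if l.findIdx (fun i => i ≠ 2) = l.length then List.replicate l.length (0 : Int)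
       else List.replicate (l.findIdx (fun i => i ≠ 2)) (0 : Int) ++
            [(l[l.findIdx (fun i => i ≠ 2)]?.getD 0) + 1] ++
            l.drop (l.findIdx (fun i => i ≠ 2) + 1)) := by
  induction l with
  | nil => simp [pvCarry]
  | cons i t ih =>
    by_cases h : i = 2
    · simp [pvCarry, h, List.findIdx_cons, ih, List.replicate_succ]
      exact apply_ite (List.cons (0 : Int)) _ _ _
    · have h3 : ¬ i + 1 = 3 := by omega
      simp [pvCarry, h3, List.findIdx_cons, h]

-- ===== VERDICT (by name: the statement is the Claim_ definition above) =====
theorem iterate_bi_spec : Claim_equal_iterate_bi := by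
  intro cycle _
  show iterate_bi cycle = iterate_bi_alt cycle
  unfold iterate_bi iterate_bi_alt
  simp only [pvFold_true, List.nil_append, pvCarry_eq_construct]
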